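-- pv_equiv track=rewrite | github.com/theploob/Your-Local-Malevolent-AI | CommandRoll.py | checkGrammar
-- ===== SOURCE A (Python) =====
-- OP_ADD = 1
--
-- OP_MULT = 2
--
-- OP_DIE = 3
--
-- OP_KEEP = 4
--
-- OP_CONDITION = 5
--
-- OP_EXP = 6
--
-- OP_STPAR = 7
--
-- OP_ENPAR = 8
--
-- def checkGrammar(tokenOps):
--     # Have toksOps array, ensure no unusable statements occur
--     # OP_INT = 0
--     # OP_ADD = 1
--     # OP_MULT = 2
--     # OP_DIE = 3
--     # OP_KEEP = 4
--     # OP_CONDITION = 5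
--     # OP_EXP = 6
--     # OP_STPAR = 7
--     # OP_ENPAR = 8
--     # OP_BRIEF = 9
--     stparen = 0
--     enparen = 0
--     # TODO finish grammar checker, find more break cases
--     for n,t in enumerate(tokenOps): # Turn into function array switch
--         if t == OP_STPAR:
--             stparen += 1
--         elif t == OP_ENPAR:
--             enparen += 1
--         elif n == 0: # Things that can't start a statement
--             if t in [OP_ADD, OP_MULT, OP_KEEP, OP_CONDITION, OP_EXP, OP_ENPAR]:
--                 return False
--         elif n == len(tokenOps)-1: # Things that can't end a statement
--             if t in [OP_ADD, OP_MULT, OP_DIE, OP_CONDITION, OP_STPAR]: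
--                 return False
--
--     if stparen != enparen: # Unequal parenthesis
--         return False
--
--     return True
-- ===== SOURCE B (Python) =====
-- OP_ADD = 1
-- OP_MULT = 2
-- OP_DIE = 3
-- OP_KEEP = 4
-- OP_CONDITION = 5
-- OP_EXP = 6
-- OP_STPAR = 7
-- OP_ENPAR = 8
--
-- def checkGrammar(tokenOps):
--     # Endpoint checks first (parens at an endpoint are exempt: they are
--     # absorbed by the paren-counting branches in the grammar), then a
--     # balanced-parenthesis count via two counting passes.
--     if tokenOps:
--         if tokenOps[0] in (OP_ADD, OP_MULT, OP_KEEP, OP_CONDITION, OP_EXP):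
--             return False
--         if len(tokenOps) > 1 and tokenOps[-1] in (OP_ADD, OP_MULT, OP_DIE, OP_CONDITION):
--             return False
--     return tokenOps.count(OP_STPAR) == tokenOps.count(OP_ENPAR)
-- ===== Notes on version B (the rewrite author's own statement) =====
-- stated objective: simpler
-- what changed: Replaced the fused enumerate loop with index-sensitive elif dispatch by two explicit endpoint checks (first/last token, parens exempt) followed by two counting passes tokenOps.count(OP_STPAR) == tokenOps.count(OP_ENPAR).
import Mathlib
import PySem

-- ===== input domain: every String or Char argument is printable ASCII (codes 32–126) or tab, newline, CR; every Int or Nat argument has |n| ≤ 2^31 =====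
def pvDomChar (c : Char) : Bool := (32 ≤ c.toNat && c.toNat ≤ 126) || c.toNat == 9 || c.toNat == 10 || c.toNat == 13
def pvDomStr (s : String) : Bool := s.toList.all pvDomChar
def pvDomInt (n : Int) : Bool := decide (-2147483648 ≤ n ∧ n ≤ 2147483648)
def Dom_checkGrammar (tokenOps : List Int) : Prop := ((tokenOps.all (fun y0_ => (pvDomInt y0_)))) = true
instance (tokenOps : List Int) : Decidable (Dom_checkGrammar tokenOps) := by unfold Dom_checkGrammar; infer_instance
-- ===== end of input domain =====

-- B replaces A's fused indexed elif loop by explicit first/last-token checks plus two counting passes (simpler).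

-- ===== PORT A =====
-- A's enumerate loop with early 'return False', as structural recursion over the
-- remaining tokens carrying the running index n and the two paren counters
def checkGrammarLoop (tokenOps : List Int) (n : Nat) (rest : List Int) (stparen enparen : Int) : Bool :=
  match rest with
  | [] => stparen == enparen
  | t :: rs =>
    if t == 7 then checkGrammarLoop tokenOps (n + 1) rs (stparen + 1) enparen
    else if t == 8 then checkGrammarLoop tokenOps (n + 1) rs stparen (enparen + 1)
    else if n == 0 then
      if t == 1 || t == 2 || t == 4 || t == 5 || t == 6 || t == 8 then false
      else checkGrammarLoop tokenOps (n + 1) rs stparen enparen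
    else if n == tokenOps.length - 1 then
      if t == 1 || t == 2 || t == 3 || t == 5 || t == 7 then false
      else checkGrammarLoop tokenOps (n + 1) rs stparen enparen
    else checkGrammarLoop tokenOps (n + 1) rs stparen enparen

def checkGrammar (tokenOps : List Int) : Bool :=
  checkGrammarLoop tokenOps 0 tokenOps 0 0

-- ===== PORT B =====
def checkGrammar_alt (tokenOps : List Int) : Bool :=
  match tokenOps with
  | [] => PySem.List.count tokenOps 7 == PySem.List.count tokenOps 8
  | t0 :: _ =>
    if t0 == 1 || t0 == 2 || t0 == 4 || t0 == 5 || t0 == 6 then false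
    else if decide (1 < tokenOps.length) &&
           (match PySem.List.pyGet? tokenOps (-1) with
            | some tl => tl == 1 || tl == 2 || tl == 3 || tl == 5
            | none => false) then false
    else PySem.List.count tokenOps 7 == PySem.List.count tokenOps 8

-- ===== PRECONDITION & SPEC =====
def Spec_checkGrammar (tokenOps : List Int) (out : Bool) : Prop := out = checkGrammar_alt tokenOps
instance (tokenOps : List Int) (out : Bool) : Decidable (Spec_checkGrammar tokenOps out) := by unfold Spec_checkGrammar; infer_instance

-- ===== CLAIM (what is proved, stated in full; the proofs are below) =====
def Claim_equal_checkGrammar : Prop := ∀ (tokenOps : List Int), Dom_checkGrammar tokenOps → Spec_checkGrammar tokenOps (checkGrammar tokenOps)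

-- ===== LEMMAS AND PROOFS =====

-- tokens that may not end a statement (parens are handled by the counting branches)
def pvBadEnd (t : Int) : Bool := t == 1 || t == 2 || t == 3 || t == 5

-- characterisation of A's loop from index 1 onwards: the only remaining endpoint check
-- is the last-element check, and otherwise the loop just counts parens
theorem checkGrammarLoop_ge_one
    (tokenOps : List Int) (rest : List Int) (n : Nat) (st en : Int)
    (hn : 1 ≤ n) (hlen : n + rest.length = tokenOps.length) :
    checkGrammarLoop tokenOps n rest st en =
      (if pvBadEnd (rest.getLastD 0) then false
       else decide (st + (rest.count 7 : Int) = en + (rest.count 8 : Int))) := by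
  induction rest generalizing n st en with
  | nil =>
    simp only [checkGrammarLoop, List.getLastD_nil, pvBadEnd]
    rw [Bool.eq_iff_iff]; simp
  | cons t rs ih =>
    have hn0 : ¬ n = 0 := by omega
    cases rs with
    | nil =>
      have hlast : n = tokenOps.length - 1 := by
        simp only [List.length_cons, List.length_nil] at hlen; omega
      have hL : (n == tokenOps.length - 1) = true := by simp [hlast]
      have h0 : (n == 0) = false := by simp [hn0]
      by_cases h7 : t = 7
      · subst h7
        simp only [checkGrammarLoop, List.getLastD_cons, List.getLastD_nil]
        rw [Bool.eq_iff_iff]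
        simp [pvBadEnd]
      · by_cases h8 : t = 8
        · subst h8
          simp only [checkGrammarLoop, List.getLastD_cons, List.getLastD_nil]
          rw [Bool.eq_iff_iff]
          simp [pvBadEnd]
        · by_cases hb : pvBadEnd t = true
          · have : (t == 1 || t == 2 || t == 3 || t == 5 || t == 7) = true := by
              simp [pvBadEnd] at hb ⊢; tauto
            simp [checkGrammarLoop, h7, h8, h0, hL, this, hb]
          · have hb' : (t == 1 || t == 2 || t == 3 || t == 5 || t == 7) = false := by
              simp [pvBadEnd] at hb ⊢; tauto
            simp only [checkGrammarLoop, h7, h8, h0, hL, hb', List.getLastD_cons,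
              List.getLastD_nil, hb, Bool.false_eq_true, if_false, if_neg,
              beq_iff_eq, reduceIte]
            rw [Bool.eq_iff_iff]
            simp [List.count_cons, h7, h8]
    | cons t2 rs2 =>
      have hnl : (n == tokenOps.length - 1) = false := by
        simp only [List.length_cons] at hlen
        simp; omega
      have h0 : (n == 0) = false := by simp [hn0]
      have hlen' : (n + 1) + (t2 :: rs2).length = tokenOps.length := by
        simp only [List.length_cons] at hlen ⊢; omega
      have hl : (t :: t2 :: rs2).getLastD 0 = (t2 :: rs2).getLastD 0 := by
        rw [List.getLastD_eq_getLast?, List.getLastD_eq_getLast?, List.getLast?_cons_cons]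
      by_cases h7 : t = 7
      · subst h7
        rw [show checkGrammarLoop tokenOps n (7 :: t2 :: rs2) st en
              = checkGrammarLoop tokenOps (n + 1) (t2 :: rs2) (st + 1) en from by
            simp [checkGrammarLoop]]
        rw [ih (n + 1) (st + 1) en (by omega) hlen', hl]
        by_cases hc : pvBadEnd ((t2 :: rs2).getLastD 0) = true
        · rw [if_pos hc, if_pos hc]
        · simp only [Bool.not_eq_true] at hc
          simp only [hc, Bool.false_eq_true, if_false]
          rw [decide_eq_decide]
          simp only [List.count_cons, beq_iff_eq]
          split_ifs <;> push_cast <;> omega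
      · by_cases h8 : t = 8
        · subst h8
          rw [show checkGrammarLoop tokenOps n (8 :: t2 :: rs2) st en
                = checkGrammarLoop tokenOps (n + 1) (t2 :: rs2) st (en + 1) from by
              simp [checkGrammarLoop]]
          rw [ih (n + 1) st (en + 1) (by omega) hlen', hl]
          by_cases hc : pvBadEnd ((t2 :: rs2).getLastD 0) = true
          · rw [if_pos hc, if_pos hc]
          · simp only [Bool.not_eq_true] at hc
            simp only [hc, Bool.false_eq_true, if_false]
            rw [decide_eq_decide]
            simp only [List.count_cons, beq_iff_eq]
            split_ifs <;> push_cast <;> omega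
        · rw [show checkGrammarLoop tokenOps n (t :: t2 :: rs2) st en
                = checkGrammarLoop tokenOps (n + 1) (t2 :: rs2) st en from by
              simp [checkGrammarLoop, h7, h8, h0, hnl]]
          rw [ih (n + 1) st en (by omega) hlen', hl]
          by_cases hc : pvBadEnd ((t2 :: rs2).getLastD 0) = true
          · rw [if_pos hc, if_pos hc]
          · simp only [Bool.not_eq_true] at hc
            simp only [hc, Bool.false_eq_true, if_false]
            rw [decide_eq_decide]
            simp only [List.count_cons, beq_iff_eq]
            split_ifs <;> push_cast <;> omega

theorem pyGetNegOne_getLast? (xs : List Int) :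
    PySem.List.pyGet? xs (-1) = xs.getLast? := by
  simp only [PySem.List.pyGet?, PySem.List.pyIdx?]
  cases xs with
  | nil => simp
  | cons a l =>
    rw [List.getLast?_eq_getElem?]
    simp only [List.length_cons]
    norm_num

theorem checkGrammar_eq_alt (tokenOps : List Int) :
    checkGrammar tokenOps = checkGrammar_alt tokenOps := by
  have hcnt : ∀ (xs : List Int) (v : Int), PySem.List.count xs v = xs.count v :=
    fun xs v => PySem.List.count_eq xs v
  cases tokenOps with
  | nil => rfl
  | cons t0 rs =>
    -- reduce B's last-element lookup to getLastD
    have hlast? : ∀ (b : Int) (l : List Int),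
        PySem.List.pyGet? (b :: l) (-1) = some ((b :: l).getLastD 0) := by
      intro b l
      rw [pyGetNegOne_getLast?, List.getLastD_eq_getLast?]
      cases h : (b :: l).getLast? with
      | none => simp at h
      | some v => rfl
    -- one step of A's loop at index 0, then the ≥1 characterisation
    by_cases h7 : t0 = 7
    · subst h7
      rw [show checkGrammar (7 :: rs) = checkGrammarLoop (7 :: rs) 1 rs 1 0 from by
          simp [checkGrammar, checkGrammarLoop]]
      rw [checkGrammarLoop_ge_one (7 :: rs) rs 1 1 0 le_rfl (by simp [Nat.add_comm])]
      cases rs with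
      | nil =>
        simp [checkGrammar_alt, pvBadEnd, hcnt]
      | cons t2 rs2 =>
        simp only [checkGrammar_alt, hlast?, hcnt]
        have hfc : ((7:Int) == 1 || (7:Int) == 2 || (7:Int) == 4 || (7:Int) == 5 || (7:Int) == 6) = false := by decide
        have hln : (decide (1 < (7 :: t2 :: rs2 : List Int).length)) = true := by
          simp
        rw [hfc, hln]
        have hl : (7 :: t2 :: rs2 : List Int).getLastD 0 = (t2 :: rs2).getLastD 0 := by
          rw [List.getLastD_eq_getLast?, List.getLastD_eq_getLast?, List.getLast?_cons_cons]
        rw [hl]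
        obtain ⟨tl, htl⟩ : ∃ tl, (t2 :: rs2).getLast? = some tl := by
          cases h : (t2 :: rs2).getLast? with
          | none => simp at h
          | some v => exact ⟨v, rfl⟩
        have hgd : (t2 :: rs2).getLastD 0 = tl := by
          rw [List.getLastD_eq_getLast?, htl]; rfl
        rw [hgd]
        cases hbv : pvBadEnd tl with
        | true =>
          simp only [pvBadEnd] at hbv
          simp [hbv, pvBadEnd]
        | false =>
          simp only [pvBadEnd] at hbv
          simp only [pvBadEnd, hbv, Bool.false_eq_true, if_false, Bool.true_and]
          rw [Bool.eq_iff_iff]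
          simp [List.count_cons]
          split_ifs <;> push_cast <;> omega
    · by_cases h8 : t0 = 8
      · subst h8
        rw [show checkGrammar (8 :: rs) = checkGrammarLoop (8 :: rs) 1 rs 0 1 from by
            simp [checkGrammar, checkGrammarLoop]]
        rw [checkGrammarLoop_ge_one (8 :: rs) rs 1 0 1 le_rfl (by simp [Nat.add_comm])]
        cases rs with
        | nil =>
          simp [checkGrammar_alt, pvBadEnd, hcnt]
        | cons t2 rs2 =>
          simp only [checkGrammar_alt, hlast?, hcnt]
          have hfc : ((8:Int) == 1 || (8:Int) == 2 || (8:Int) == 4 || (8:Int) == 5 || (8:Int) == 6) = false := by decide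
          have hln : (decide (1 < (8 :: t2 :: rs2 : List Int).length)) = true := by
            simp
          rw [hfc, hln]
          have hl : (8 :: t2 :: rs2 : List Int).getLastD 0 = (t2 :: rs2).getLastD 0 := by
            rw [List.getLastD_eq_getLast?, List.getLastD_eq_getLast?, List.getLast?_cons_cons]
          rw [hl]
          obtain ⟨tl, htl⟩ : ∃ tl, (t2 :: rs2).getLast? = some tl := by
            cases h : (t2 :: rs2).getLast? with
            | none => simp at h
            | some v => exact ⟨v, rfl⟩
          have hgd : (t2 :: rs2).getLastD 0 = tl := by
            rw [List.getLastD_eq_getLast?, htl]; rfl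
          rw [hgd]
          cases hbv : pvBadEnd tl with
          | true =>
            simp only [pvBadEnd] at hbv
            simp [hbv, pvBadEnd]
          | false =>
            simp only [pvBadEnd] at hbv
            simp only [pvBadEnd, hbv, Bool.false_eq_true, if_false, Bool.true_and]
            rw [Bool.eq_iff_iff]
            simp [List.count_cons]
            split_ifs <;> push_cast <;> omega
      · by_cases hb0 : (t0 == 1 || t0 == 2 || t0 == 4 || t0 == 5 || t0 == 6) = true
        · have hb0' : (t0 == 1 || t0 == 2 || t0 == 4 || t0 == 5 || t0 == 6 || t0 == 8) = true := by
            simp at hb0 ⊢; tauto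
          rw [show checkGrammar (t0 :: rs) = false from by
              simp only [checkGrammar, checkGrammarLoop]
              simp [h7, h8]
              simp at hb0'; tauto]
          simp [checkGrammar_alt, hb0]
        · have hb0' : (t0 == 1 || t0 == 2 || t0 == 4 || t0 == 5 || t0 == 6 || t0 == 8) = false := by
            simp at hb0 ⊢; tauto
          rw [show checkGrammar (t0 :: rs) = checkGrammarLoop (t0 :: rs) 1 rs 0 0 from by
              simp only [checkGrammar, checkGrammarLoop]
              simp [h7, h8]
              simp at hb0'; tauto]
          rw [checkGrammarLoop_ge_one (t0 :: rs) rs 1 0 0 le_rfl (by simp [Nat.add_comm])]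
          cases rs with
          | nil =>
            simp only [checkGrammar_alt, hb0, Bool.false_eq_true, if_false,
              List.getLastD_nil, pvBadEnd, hcnt]
            rw [Bool.eq_iff_iff]
            simp [List.count_cons, h7, h8]
          | cons t2 rs2 =>
            simp only [checkGrammar_alt, hlast?, hcnt, hb0, Bool.false_eq_true, if_false]
            have hln : (decide (1 < (t0 :: t2 :: rs2 : List Int).length)) = true := by
              simp
            rw [hln]
            have hl : (t0 :: t2 :: rs2 : List Int).getLastD 0 = (t2 :: rs2).getLastD 0 := by
              rw [List.getLastD_eq_getLast?, List.getLastD_eq_getLast?, List.getLast?_cons_cons]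
            rw [hl]
            obtain ⟨tl, htl⟩ : ∃ tl, (t2 :: rs2).getLast? = some tl := by
              cases h : (t2 :: rs2).getLast? with
              | none => simp at h
              | some v => exact ⟨v, rfl⟩
            have hgd : (t2 :: rs2).getLastD 0 = tl := by
              rw [List.getLastD_eq_getLast?, htl]; rfl
            rw [hgd]
            cases hbv : pvBadEnd tl with
            | true =>
              simp only [pvBadEnd] at hbv
              simp [hbv, pvBadEnd]
            | false =>
              simp only [pvBadEnd] at hbv
              simp only [pvBadEnd, hbv, Bool.false_eq_true, if_false, Bool.true_and]
              rw [Bool.eq_iff_iff]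
              simp [List.count_cons, h7, h8]
              split_ifs <;> push_cast <;> omega

-- ===== VERDICT (by name: the statement is the Claim_ definition above) =====
theorem checkGrammar_spec : Claim_equal_checkGrammar := by
  intro tokenOps _
  unfold Spec_checkGrammar
  exact checkGrammar_eq_alt tokenOps
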